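-- pv_equiv track=rewrite | github.com/bharathparvatham/CP_2ndYear | 06-leastfrequentletters-Python/leastfrequentletters.py | leastfrequentletters
-- ===== SOURCE A (Python) =====
-- def leastfrequentletters(s):
--     # Your code goes here
--     if s == "":
--         return ""
--
--     s = s.lower()
--     result = ""
--     count = 1
--
--     for char in s:
--         if char.isalpha():
--             if s.count(char) == count:
--                 result += char
--             elif s.count(char) < count:
--                 result = char
--                 count = s.count(char)
--     return "".join(sorted(result))
-- ===== SOURCE B (Python) =====
-- def leastfrequentletters(s):
--     letters = sorted(c for c in s.lower() if c.isalpha())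
--     out = []
--     i = 0
--     n = len(letters)
--     while i < n:
--         j = i
--         while j < n and letters[j] == letters[i]:
--             j += 1
--         if j - i == 1:
--             out.append(letters[i])
--         i = j
--     return "".join(out)
-- ===== Notes on version B (the rewrite author's own statement) =====
-- stated objective: faster
-- what changed: A rescans the whole lowercased string with s.count for every character (quadratic) and keeps a redundant running minimum; B filters the alphabetic characters, sorts them once, and keeps the length-1 runs in a single scan of the sorted list.
import Mathlib
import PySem

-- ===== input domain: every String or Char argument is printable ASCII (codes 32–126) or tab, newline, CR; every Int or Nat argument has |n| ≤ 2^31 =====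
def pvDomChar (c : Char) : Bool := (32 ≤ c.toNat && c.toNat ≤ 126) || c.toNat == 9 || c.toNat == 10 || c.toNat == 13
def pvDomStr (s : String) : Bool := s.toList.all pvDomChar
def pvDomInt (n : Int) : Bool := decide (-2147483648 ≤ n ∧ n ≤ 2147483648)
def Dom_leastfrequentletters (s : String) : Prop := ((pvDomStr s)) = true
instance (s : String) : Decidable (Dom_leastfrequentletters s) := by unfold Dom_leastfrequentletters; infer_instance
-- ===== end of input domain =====

-- B replaces A's per-character whole-string s.count rescans (quadratic) by one sorted pass
-- that keeps the length-1 runs (objective: faster, O(n log n) vs O(n^2); measured faster).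

-- ===== PORT A =====
-- the loop body of A: state = (result, count)
def stepA (t : List Char) (st : List Char × Nat) (c : Char) : List Char × Nat :=
  if PySem.Chars.isalpha c then
    if PySem.Chars.count t [c] = st.2 then (st.1 ++ [c], st.2)
    else if PySem.Chars.count t [c] < st.2 then ([c], PySem.Chars.count t [c])
    else st
  else st

def leastfrequentletters (s : String) : String :=
  if s = "" then ""
  else
    let t := PySem.Chars.lower s.toList
    let st := t.foldl (stepA t) ([], 1)
    String.mk (PySem.List.sorted st.1 (fun x => x) false)

-- ===== PORT B =====
-- Source B's outer while: take the run of the first letter; keep it if the run has length 1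
def pySingles (letters : List Char) : List Char :=
  match letters with
  | [] => []
  | c :: rest =>
    let same := rest.takeWhile (fun x => x == c)
    let rest2 := rest.dropWhile (fun x => x == c)
    (if same.isEmpty then [c] else []) ++ pySingles rest2
termination_by letters.length
decreasing_by
  simp only [List.length_cons]
  have := List.length_dropWhile_le (fun x => x == c) rest
  omega

def leastfrequentletters_alt (s : String) : String :=
  let letters :=
    PySem.List.sorted ((PySem.Chars.lower s.toList).filter PySem.Chars.isalpha) (fun x => x) false
  String.mk (pySingles letters)

-- ===== PRECONDITION & SPEC =====
def Spec_leastfrequentletters (s : String) (out : String) : Prop := out = leastfrequentletters_alt s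
instance (s : String) (out : String) : Decidable (Spec_leastfrequentletters s out) := by unfold Spec_leastfrequentletters; infer_instance

-- ===== CLAIM (what is proved, stated in full; the proofs are below) =====
def Claim_equal_leastfrequentletters : Prop := ∀ (s : String), Dom_leastfrequentletters s → Spec_leastfrequentletters s (leastfrequentletters s)

-- ===== LEMMAS AND PROOFS =====

-- Python's s.count(c) for a single character c is the character count
theorem chars_count_go_single (c : Char) : ∀ (l : List Char) (fuel acc : Nat), l.length ≤ fuel →
    PySem.Chars.count.go [c] fuel l acc = acc + l.count c := by
  intro l
  induction l with
  | nil => intro fuel acc h; cases fuel <;> simp [PySem.Chars.count.go]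
  | cons a t ih =>
    intro fuel acc h
    cases fuel with
    | zero => simp at h
    | succ f =>
      rw [PySem.Chars.count.go]
      simp at h
      by_cases hc : a = c
      · subst hc
        simp only [List.isPrefixOf, beq_self_eq_true, Bool.true_and, if_pos]
        rw [show (a :: t).drop [a].length = t from rfl]
        rw [ih f (acc + 1) h]
        simp
        omega
      · have : ([c].isPrefixOf (a :: t)) = false := by
          simp [List.isPrefixOf]; exact fun h' => absurd h'.symm hc
        rw [this]
        simp only [Bool.false_eq_true, if_false]
        rw [ih f acc h]
        simp [hc]

theorem chars_count_single (l : List Char) (c : Char) :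
    PySem.Chars.count l [c] = l.count c := by
  simp [PySem.Chars.count]
  rw [chars_count_go_single c l l.length 0 le_rfl]
  omega

-- A's loop: since every scanned character occurs in t, count stays 1 and
-- result accumulates exactly the alphabetic characters occurring once in t.
theorem foldA (t : List Char) : ∀ (l : List Char) (acc : List Char), (∀ c ∈ l, c ∈ t) →
    l.foldl (stepA t) (acc, 1) =
      (acc ++ l.filter (fun c => PySem.Chars.isalpha c && (t.count c == 1)), 1) := by
  intro l
  induction l with
  | nil => intro acc _; simp
  | cons c rest ih =>
    intro acc h
    have hct : c ∈ t := h c (List.mem_cons_self)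
    have hpos : 0 < t.count c := List.count_pos_iff.mpr hct
    have hrest : ∀ x ∈ rest, x ∈ t := fun x hx => h x (List.mem_cons_of_mem _ hx)
    simp only [List.foldl_cons]
    by_cases ha : PySem.Chars.isalpha c
    · by_cases h1 : t.count c = 1
      · have : stepA t (acc, 1) c = (acc ++ [c], 1) := by
          simp [stepA, ha, chars_count_single, h1]
        rw [this, ih (acc ++ [c]) hrest]
        simp [ha, h1]
      · have : stepA t (acc, 1) c = (acc, 1) := by
          simp [stepA, ha, chars_count_single, h1]
          omega
        rw [this, ih acc hrest]
        simp [ha, h1]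
    · have : stepA t (acc, 1) c = (acc, 1) := by simp [stepA, ha]
      rw [this, ih acc hrest]
      simp [ha]

-- B's run scan on a sorted list keeps exactly the characters occurring once.
theorem singles_eq_filter : ∀ (n : Nat) (l : List Char), l.length ≤ n →
    l.Pairwise (· ≤ ·) → pySingles l = l.filter (fun c => l.count c == 1) := by
  intro n
  induction n with
  | zero =>
    intro l hl _
    have : l = [] := List.length_eq_zero_iff.mp (Nat.le_zero.mp hl)
    subst this; simp [pySingles]
  | succ n ih =>
    intro l hl hs
    cases l with
    | nil => simp [pySingles]
    | cons c rest =>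
      have hsplit : rest.takeWhile (fun x => x == c) ++ rest.dropWhile (fun x => x == c) = rest :=
        List.takeWhile_append_dropWhile
      set same := rest.takeWhile (fun x => x == c) with hsame_def
      set rest2 := rest.dropWhile (fun x => x == c) with hrest2_def
      have hsame : ∀ x ∈ same, x = c := by
        intro x hx
        have := List.mem_takeWhile_imp hx
        simpa using this
      have hrestle : ∀ x ∈ rest, c ≤ x := by
        intro x hx
        exact (List.pairwise_cons.mp hs).1 x hx
      have hrest2sub : rest2.Sublist rest := List.dropWhile_sublist _
      -- the head of rest2 (if any) differs from c, and all of rest is ≥ c, so c ∉ rest2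
      have hnotin : c ∉ rest2 := by
        intro hc
        obtain ⟨d, r2, hdr⟩ : ∃ d r2, rest2 = d :: r2 := by
          cases h : rest2 with
          | nil => rw [h] at hc; simp at hc
          | cons d r2 => exact ⟨d, r2, rfl⟩
        have hh := List.head?_dropWhile_not (fun x => x == c) rest
        rw [← hrest2_def, hdr] at hh
        have hdne : d ≠ c := by simpa using hh
        have hdmem : d ∈ rest := hrest2sub.mem (hdr ▸ List.mem_cons_self)
        rw [hdr] at hc
        rcases List.mem_cons.mp hc with h | h
        · exact hdne h.symm
        · have hr2sorted : (d :: r2).Pairwise (· ≤ ·) :=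
            ((List.pairwise_cons.mp hs).2.sublist (hdr ▸ hrest2sub))
          have hdc : d ≤ c := (List.pairwise_cons.mp hr2sorted).1 c h
          exact hdne (le_antisymm hdc (hrestle d hdmem))
      have hsamecount : same.count c = same.length :=
        List.count_eq_length.mpr (fun b hb => (hsame b hb).symm)
      have hcount_c : (c :: rest).count c = 1 + same.length := by
        rw [List.count_cons_self, ← hsplit, List.count_append, hsamecount,
          List.count_eq_zero.mpr hnotin]
        omega
      -- count of an element of rest2 in the whole list is its count in rest2
      have hcount_r2 : ∀ x ∈ rest2, (c :: rest).count x = rest2.count x := by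
        intro x hx
        have hxc : x ≠ c := fun h => hnotin (h ▸ hx)
        have hxsame : x ∉ same := fun h => hxc (hsame x h)
        have h1 : (c :: rest).count x = rest.count x := by
          rw [List.count_cons]; simp [Ne.symm hxc]
        rw [h1, ← hsplit, List.count_append, List.count_eq_zero.mpr hxsame]
        omega
      have hlen2 : rest2.length ≤ n := by
        have h1 := hrest2sub.length_le
        simp only [List.length_cons] at hl
        omega
      have hih := ih rest2 hlen2 ((List.pairwise_cons.mp hs).2.sublist hrest2sub)
      have hqsame : same.filter (fun x => (c :: rest).count x == 1) = [] := by
        cases he : same with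
        | nil => rfl
        | cons a s =>
          apply List.filter_eq_nil_iff.mpr
          intro x hx
          have hxc : x = c := hsame x (he ▸ hx)
          subst hxc
          simp only [hcount_c, he]
          simp
      have hqr2 : rest2.filter (fun x => (c :: rest).count x == 1)
          = rest2.filter (fun x => rest2.count x == 1) :=
        List.filter_congr (fun x hx => by rw [hcount_r2 x hx])
      have hsplitf : rest.filter (fun x => (c :: rest).count x == 1)
          = same.filter (fun x => (c :: rest).count x == 1)
            ++ rest2.filter (fun x => (c :: rest).count x == 1) := by
        rw [← List.filter_append]
        exact congrArg _ hsplit.symm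
      rw [pySingles]
      simp only [← hrest2_def, ← hsame_def]
      conv_rhs => rw [List.filter_cons]
      rw [hsplitf, hqsame, hqr2, ← hih]
      by_cases he : same.isEmpty
      · have h0 : same = [] := List.isEmpty_iff.mp he
        simp [hcount_c, h0]
      · have h0 : same ≠ [] := fun h => he (by simp [h])
        have hlenpos : 0 < same.length := List.length_pos_iff.mpr h0
        have hrc : rest.count c = same.length := by
          rw [← hsplit, List.count_append, hsamecount, List.count_eq_zero.mpr hnotin]
          omega
        simp [he, hrc]
        omega

-- the two final lists agree
theorem main_lists (t : List Char) :
    PySem.List.sorted (t.filter (fun c => PySem.Chars.isalpha c && (t.count c == 1)))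
        (fun x => x) false
      = pySingles (PySem.List.sorted (t.filter PySem.Chars.isalpha) (fun x => x) false) := by
  set F := t.filter PySem.Chars.isalpha with hF
  set L := PySem.List.sorted F (fun x => x) false with hL
  have hperm : L.Perm F := PySem.List.sorted_perm F (fun x => x) false
  have hLsorted : L.Pairwise (· ≤ ·) := PySem.List.sorted_pairwise F (fun x => x)
  have hLcount : ∀ x, L.count x = F.count x := fun x => hperm.count_eq x
  -- B's side: run scan = count-1 filter on L
  rw [singles_eq_filter L.length L le_rfl hLsorted]
  -- the filtered list is a strictly increasing permutation of A's filtered list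
  apply PySem.List.sorted_eq_of_perm_of_pairwise_lt
  · -- permutation
    have h1 : (L.filter (fun c => L.count c == 1)).Perm (F.filter (fun c => L.count c == 1)) :=
      hperm.filter _
    have h2 : F.filter (fun c => L.count c == 1)
        = t.filter (fun c => PySem.Chars.isalpha c && (t.count c == 1)) := by
      rw [hF, List.filter_filter]
      apply List.filter_congr
      intro x hx
      by_cases ha : PySem.Chars.isalpha x
      · have : F.count x = t.count x := by
          rw [hF]; exact List.count_filter ha
        rw [hLcount, this]
        simp [ha]
      · simp [ha]
    rw [← h2]
    exact h1
  · -- strictly increasing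
    have hsub : (L.filter (fun c => L.count c == 1)).Sublist L := List.filter_sublist
    have hle : (L.filter (fun c => L.count c == 1)).Pairwise (· ≤ ·) :=
      hLsorted.sublist hsub
    have hnd : (L.filter (fun c => L.count c == 1)).Nodup := by
      rw [List.nodup_iff_count_le_one]
      intro a
      by_cases ha : a ∈ L.filter (fun c => L.count c == 1)
      · have h1 : L.count a = 1 := by
          have := List.of_mem_filter ha
          simpa using this
        calc (L.filter (fun c => L.count c == 1)).count a ≤ L.count a :=
              hsub.count_le a
          _ = 1 := h1
      · rw [List.count_eq_zero.mpr ha]; omega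
    have := hle.and hnd
    exact this.imp (fun ⟨h1, h2⟩ => lt_of_le_of_ne h1 h2)

-- ===== VERDICT (by name: the statement is the Claim_ definition above) =====
theorem leastfrequentletters_spec : Claim_equal_leastfrequentletters := by
  intro s _
  unfold Spec_leastfrequentletters leastfrequentletters leastfrequentletters_alt
  by_cases hs : s = ""
  · subst hs
    have h1 : pySingles [] = [] := by simp [pySingles]
    have h2 : PySem.Chars.lower ([] : List Char) = [] := rfl
    have h3 : PySem.List.sorted ([] : List Char) (fun x => x) false = [] := rfl
    simp [h1, h2, h3]
    rfl
  · simp only [hs, if_false]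
    rw [foldA (PySem.Chars.lower s.toList) (PySem.Chars.lower s.toList) [] (fun c hc => hc)]
    simp only [List.nil_append]
    rw [main_lists]
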